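-- pv_equiv track=rewrite | github.com/MelaHub/advent-of-code | 2017/day03/manhattan.py | get_memory_position
-- ===== SOURCE A (Python) =====
-- from math import ceil, floor, sqrt
--
-- def get_memory_position(memory_location):
--   square_size = ceil(sqrt(memory_location))
--   if square_size % 2 == 0:
--     square_size += 1
--   min_square = pow(square_size - 2, 2) + 1
--   max_square = pow(square_size, 2)
--   square_coordinates = [
--     (min_square + n * (square_size - 1), min_square + (n + 1) * (square_size - 1) - 1)
--     for n in range(0, 4)
--   ]
--   coordinates = (0, 0)
--   half_arm = floor(square_size / 2)
--   for i, (min_arm, max_arm) in enumerate(square_coordinates):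
--     if memory_location >= min_arm and memory_location <= max_arm:
--       position_on_arm = memory_location - min_arm - half_arm + 1
--       if i == 0:
--         coordinates = (half_arm, position_on_arm)
--       elif i == 1:
--         coordinates = (-position_on_arm, half_arm)
--       elif i == 2:
--         coordinates = (-half_arm, -position_on_arm)
--       elif i == 3:
--         coordinates = (position_on_arm, -half_arm)
--       break
--   return coordinates
-- ===== SOURCE B (Python) =====
-- def get_memory_position(memory_location):
--   # Walk the spiral leg by leg (leg lengths 1,1,2,2,3,3,... in directions
--   # right, up, left, down), jumping a whole leg at a time until the target
--   # location falls inside the current leg.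
--   DX = (1, 0, -1, 0)
--   DY = (0, 1, 0, -1)
--   x = y = 0
--   loc = 1
--   leg = 1
--   d = 0
--   while loc < memory_location:
--     step = min(leg, memory_location - loc)
--     x += DX[d] * step
--     y += DY[d] * step
--     loc += step
--     d = (d + 1) % 4
--     if d % 2 == 0:
--       leg += 1
--   return (x, y)
-- ===== Notes on version B (the rewrite author's own statement) =====
-- stated objective: alternative
-- what changed: B abandons A's closed-form ring arithmetic (ceil(sqrt), squares, the four-interval arm list) and instead simulates the spiral leg by leg with leg lengths 1,1,2,2,3,3,... and cycling directions, jumping a whole leg at a time until the target falls inside the current leg.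
import Mathlib
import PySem

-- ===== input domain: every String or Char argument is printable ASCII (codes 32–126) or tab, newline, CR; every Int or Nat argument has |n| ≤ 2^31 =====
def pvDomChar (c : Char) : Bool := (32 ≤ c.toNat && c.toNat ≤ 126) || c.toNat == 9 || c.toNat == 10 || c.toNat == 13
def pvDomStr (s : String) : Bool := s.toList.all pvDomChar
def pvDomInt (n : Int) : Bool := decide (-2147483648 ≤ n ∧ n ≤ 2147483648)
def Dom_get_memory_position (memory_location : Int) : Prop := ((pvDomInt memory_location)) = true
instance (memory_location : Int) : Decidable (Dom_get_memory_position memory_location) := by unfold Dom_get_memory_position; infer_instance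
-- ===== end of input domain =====

-- B replaces A's closed-form ring arithmetic (ceil-sqrt, squares, four-interval arm scan) by a
-- leg-by-leg simulation of the spiral walk (objective: alternative); equivalence proved for all
-- memory_location ≥ 0 (A raises ValueError on negatives, where B returns (0, 0)).

-- ===== PORT A =====
-- hand port of ceil(sqrt(n)) for n ≥ 0: the least k with k*k ≥ n; exact on the admitted
-- domain 0 ≤ n ≤ 2^31 since doubles represent these ints and their correctly-rounded roots exactly
def pyCeilSqrt (n : Int) : Int :=
  if n ≤ 0 then 0 else (Nat.sqrt (n - 1).toNat : Int) + 1

-- the 'for i, (min_arm, max_arm) in enumerate(...)' loop with its break and initial (0,0)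
def armScan (ml half_arm : Int) : List (Int × (Int × Int)) → Int × Int
  | [] => (0, 0)
  | (i, (mn, mx)) :: rest =>
    if ml ≥ mn ∧ ml ≤ mx then
      let p := ml - mn - half_arm + 1
      if i = 0 then (half_arm, p)
      else if i = 1 then (-p, half_arm)
      else if i = 2 then (-half_arm, -p)
      else if i = 3 then (p, -half_arm)
      else (0, 0)
    else armScan ml half_arm rest

def get_memory_position (memory_location : Int) : Int × Int :=
  let square_size0 := pyCeilSqrt memory_location
  let square_size := if PySem.Int.mod square_size0 2 = 0 then square_size0 + 1 else square_size0
  let min_square := (square_size - 2) ^ 2 + 1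
  let _max_square := square_size ^ 2
  let square_coordinates := (PySem.List.pyRange 0 4 1).map
    (fun n => (min_square + n * (square_size - 1), min_square + (n + 1) * (square_size - 1) - 1))
  let half_arm := PySem.Int.floordiv square_size 2
  armScan memory_location half_arm (PySem.List.enumerate square_coordinates)

-- ===== PORT B =====
-- the 'while loc < memory_location' loop; fuel = memory_location - 1 bounds the iteration count
-- (each iteration advances loc by at least 1), so the port is exact on the admitted domain
def walkLegs : Nat → Int → Int → Int → Int → Int → Int → Int × Int
  | 0, x, y, _, _, _, _ => (x, y)
  | f + 1, x, y, loc, leg, d, target =>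
    if loc < target then
      let step := min leg (target - loc)
      let x' := x + PySem.List.pyGetD [1, 0, -1, 0] d 0 * step
      let y' := y + PySem.List.pyGetD [0, 1, 0, -1] d 0 * step
      let loc' := loc + step
      let d' := PySem.Int.mod (d + 1) 4
      let leg' := if PySem.Int.mod d' 2 = 0 then leg + 1 else leg
      walkLegs f x' y' loc' leg' d' target
    else (x, y)

def get_memory_position_alt (memory_location : Int) : Int × Int :=
  walkLegs (memory_location - 1).toNat 0 0 1 1 0 memory_location

-- ===== PRECONDITION & SPEC =====
-- A raises ValueError (math domain error of sqrt) on negative input; nothing else is excluded.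
def Pre_get_memory_position (memory_location : Int) : Prop := 0 ≤ memory_location
instance (memory_location : Int) : Decidable (Pre_get_memory_position memory_location) := by unfold Pre_get_memory_position; infer_instance
def pvWitness_get_memory_position : Int := 10

def Spec_get_memory_position (memory_location : Int) (out : Int × Int) : Prop := out = get_memory_position_alt memory_location
instance (memory_location : Int) (out : Int × Int) : Decidable (Spec_get_memory_position memory_location out) := by unfold Spec_get_memory_position; infer_instance

-- ===== CLAIM (what is proved, stated in full; the proofs are below) =====
def Claim_equal_get_memory_position : Prop := ∀ (memory_location : Int), Dom_get_memory_position memory_location → Pre_get_memory_position memory_location → Spec_get_memory_position memory_location (get_memory_position memory_location)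

-- ===== LEMMAS AND PROOFS =====

def posTable (m t : Int) : Int × Int :=
  if t ≤ 2*m - 1 then (m, t - m + 1)
  else if t ≤ 4*m - 1 then (3*m - 1 - t, m)
  else if t ≤ 6*m - 1 then (-m, 5*m - 1 - t)
  else (t - 7*m + 1, -m)

theorem A_closed (m t : Int) (hm : 1 ≤ m) (ht0 : 0 ≤ t) (ht : t ≤ 8*m - 1) :
    get_memory_position ((2*m - 1)^2 + 1 + t) = posTable m t := by
  set ml : Int := (2*m - 1)^2 + 1 + t with hml
  have hlow : (2*m-1)^2 < ml := by nlinarith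
  have hhigh : ml ≤ (2*m+1)^2 := by nlinarith
  have hml2 : 2 ≤ ml := by nlinarith
  unfold get_memory_position pyCeilSqrt
  rw [if_neg (by omega : ¬ ml ≤ 0)]
  set s : Int := (Nat.sqrt (ml - 1).toNat : Int) with hs
  have hcast : ((ml - 1).toNat : Int) = ml - 1 := by omega
  have hlo : s * s ≤ ml - 1 := by
    have h := Int.ofNat_le.mpr (Nat.sqrt_le' (ml - 1).toNat)
    push_cast at h; rw [hs]; nlinarith [h]
  have hhi : ml - 1 < (s + 1) * (s + 1) := by
    have h := Int.ofNat_lt.mpr (Nat.lt_succ_sqrt' (ml - 1).toNat)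
    push_cast at h; rw [hs]; nlinarith [h]
  have hs0 : 0 ≤ s := by positivity
  have hs1 : 2*m - 1 ≤ s := by nlinarith
  have hs2 : s ≤ 2*m := by nlinarith
  simp only []
  rw [show PySem.Int.mod (s + 1) 2 = (s + 1) % 2 from PySem.Int.mod_eq_emod_of_pos (by omega)]
  rw [show (if (s + 1) % 2 = 0 then s + 1 + 1 else s + 1) = 2*m + 1 by
    rcases (by omega : s = 2*m - 1 ∨ s = 2*m) with h | h <;> rw [h] <;> split_ifs with h2 <;> omega]
  rw [show PySem.Int.floordiv (2*m+1) 2 = m from by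
    rw [PySem.Int.floordiv_eq_ediv_of_pos (by omega)]; omega]
  rw [(by decide : PySem.List.pyRange 0 4 1 = ([0,1,2,3] : List Int))]
  simp only [List.map_cons, List.map_nil, PySem.List.enumerate_cons, PySem.List.enumerate_nil, armScan]
  rw [hml]
  have e : (2*m + 1 - 2)^2 = (2*m - 1)^2 := by ring
  rw [e]
  generalize hM : (2*m - 1)^2 = M
  rw [hM] at hml hlow
  clear_value s
  clear_value ml
  unfold posTable
  norm_num
  split_ifs <;> simp only [Prod.mk.injEq, and_true, true_and] <;> omega

def InvHead (loc x y leg d : Int) : Prop := ∃ m : Int,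
  (1 ≤ m ∧ d = 1 ∧ leg = 2*m - 1 ∧ loc = (2*m - 1)^2 + 1 ∧ x = m ∧ y = 1 - m) ∨
  (1 ≤ m ∧ d = 2 ∧ leg = 2*m ∧ loc = (2*m - 1)^2 + 2*m ∧ x = m ∧ y = m) ∨
  (1 ≤ m ∧ d = 3 ∧ leg = 2*m ∧ loc = (2*m - 1)^2 + 4*m ∧ x = -m ∧ y = m) ∨
  (0 ≤ m ∧ d = 0 ∧ leg = 2*m + 1 ∧ loc = (2*m - 1)^2 + 6*m ∧ x = -m ∧ y = -m)

theorem head_pos (loc x y leg d : Int) (h : InvHead loc x y leg d) :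
    (x, y) = get_memory_position loc := by
  obtain ⟨m, h⟩ := h
  rcases h with ⟨hm, hd, hleg, hloc, hx, hy⟩ | ⟨hm, hd, hleg, hloc, hx, hy⟩ |
    ⟨hm, hd, hleg, hloc, hx, hy⟩ | ⟨hm, hd, hleg, hloc, hx, hy⟩ <;> subst loc x y
  · rw [show (2*m - 1)^2 + 1 = (2*m - 1)^2 + 1 + 0 by ring,
      A_closed m 0 hm le_rfl (by omega)]
    unfold posTable
    rw [if_pos (by omega)]
    simp only [Prod.mk.injEq, and_true, true_and] <;> omega
  · rw [show (2*m - 1)^2 + 2*m = (2*m - 1)^2 + 1 + (2*m - 1) by ring,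
      A_closed m (2*m - 1) hm (by omega) (by omega)]
    unfold posTable
    rw [if_pos (by omega)]
    simp only [Prod.mk.injEq, and_true, true_and] <;> omega
  · rw [show (2*m - 1)^2 + 4*m = (2*m - 1)^2 + 1 + (4*m - 1) by ring,
      A_closed m (4*m - 1) hm (by omega) (by omega)]
    unfold posTable
    rw [if_neg (by omega), if_pos (by omega)]
    simp only [Prod.mk.injEq, and_true, true_and] <;> omega
  · rcases eq_or_lt_of_le hm with h0 | h1
    · rw [← h0]; norm_num; decide
    · have hm1 : 1 ≤ m := by omega
      rw [show (2*m - 1)^2 + 6*m = (2*m - 1)^2 + 1 + (6*m - 1) by ring,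
        A_closed m (6*m - 1) hm1 (by omega) (by omega)]
      unfold posTable
      rw [if_neg (by omega), if_neg (by omega), if_pos (by omega)]
      simp only [Prod.mk.injEq, and_true, true_and] <;> omega

theorem walk_stop (f : Nat) (x y loc leg d target : Int) (h : ¬ loc < target) :
    walkLegs f x y loc leg d target = (x, y) := by
  cases f <;> simp [walkLegs, h]

theorem walk_ok (f : Nat) : ∀ (x y loc leg d target : Int),
    InvHead loc x y leg d → loc ≤ target → target ≤ loc + (f : Int) →
    walkLegs f x y loc leg d target = get_memory_position target := by
  induction f with
  | zero =>
    intro x y loc leg d target hInv hle hub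
    have hloc : loc = target := by push_cast at hub; omega
    subst hloc
    simpa [walkLegs] using head_pos loc x y leg d hInv
  | succ f ih =>
    intro x y loc leg d target hInv hle hub
    by_cases hlt : loc < target
    · simp only [walkLegs, if_pos hlt]
      obtain ⟨m, h⟩ := hInv
      rcases h with ⟨hm, hd, hleg, hloc, hx, hy⟩ | ⟨hm, hd, hleg, hloc, hx, hy⟩ |
        ⟨hm, hd, hleg, hloc, hx, hy⟩ | ⟨hm, hd, hleg, hloc, hx, hy⟩ <;>
        subst d leg loc x y <;>
        push_cast at hub
      -- up leg (d = 1)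
      · rw [show PySem.List.pyGetD ([1,0,-1,0] : List Int) 1 0 = 0 from by decide,
          show PySem.List.pyGetD ([0,1,0,-1] : List Int) 1 0 = 1 from by decide,
          show PySem.Int.mod (1+1) 4 = 2 from by decide,
          if_pos (show PySem.Int.mod (2:Int) 2 = 0 from by decide)]
        obtain ⟨t', rfl⟩ : ∃ t', target = (2*m - 1)^2 + 1 + t' :=
          ⟨target - ((2*m - 1)^2 + 1), by ring⟩
        rw [show (2*m - 1)^2 + 1 + t' - ((2*m - 1)^2 + 1) = t' from by ring]
        have ht1 : 1 ≤ t' := by linarith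
        by_cases hpar : t' ≤ 2*m - 1
        · rw [min_eq_right (by linarith), walk_stop _ _ _ _ _ _ _ (lt_irrefl _),
            A_closed m t' hm (by linarith) (by linarith)]
          unfold posTable
          rw [if_pos (by linarith)]
          simp only [Prod.mk.injEq]
          exact ⟨by ring, by ring⟩
        · rw [min_eq_left (by linarith)]
          exact ih _ _ _ _ _ _
            ⟨m, Or.inr (Or.inl ⟨hm, rfl, by ring, by ring, by ring, by ring⟩)⟩
            (by linarith) (by linarith)
      -- left leg (d = 2)
      · rw [show PySem.List.pyGetD ([1,0,-1,0] : List Int) 2 0 = -1 from by decide,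
          show PySem.List.pyGetD ([0,1,0,-1] : List Int) 2 0 = 0 from by decide,
          show PySem.Int.mod (2+1) 4 = 3 from by decide,
          if_neg (show ¬ PySem.Int.mod (3:Int) 2 = 0 from by decide)]
        obtain ⟨t', rfl⟩ : ∃ t', target = (2*m - 1)^2 + 2*m + t' :=
          ⟨target - ((2*m - 1)^2 + 2*m), by ring⟩
        rw [show (2*m - 1)^2 + 2*m + t' - ((2*m - 1)^2 + 2*m) = t' from by ring]
        have ht1 : 1 ≤ t' := by linarith
        by_cases hpar : t' ≤ 2*m
        · rw [min_eq_right (by linarith), walk_stop _ _ _ _ _ _ _ (lt_irrefl _),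
            show (2*m - 1)^2 + 2*m + t' = (2*m - 1)^2 + 1 + (2*m - 1 + t') from by ring,
            A_closed m (2*m - 1 + t') hm (by linarith) (by linarith)]
          unfold posTable
          rw [if_neg (by linarith), if_pos (by linarith)]
          simp only [Prod.mk.injEq]
          exact ⟨by ring, by ring⟩
        · rw [min_eq_left (by linarith)]
          exact ih _ _ _ _ _ _
            ⟨m, Or.inr (Or.inr (Or.inl ⟨hm, rfl, rfl, by ring, by ring, by ring⟩))⟩
            (by linarith) (by linarith)
      -- down leg (d = 3)
      · rw [show PySem.List.pyGetD ([1,0,-1,0] : List Int) 3 0 = 0 from by decide,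
          show PySem.List.pyGetD ([0,1,0,-1] : List Int) 3 0 = -1 from by decide,
          show PySem.Int.mod (3+1) 4 = 0 from by decide,
          if_pos (show PySem.Int.mod (0:Int) 2 = 0 from by decide)]
        obtain ⟨t', rfl⟩ : ∃ t', target = (2*m - 1)^2 + 4*m + t' :=
          ⟨target - ((2*m - 1)^2 + 4*m), by ring⟩
        rw [show (2*m - 1)^2 + 4*m + t' - ((2*m - 1)^2 + 4*m) = t' from by ring]
        have ht1 : 1 ≤ t' := by linarith
        by_cases hpar : t' ≤ 2*m
        · rw [min_eq_right (by linarith), walk_stop _ _ _ _ _ _ _ (lt_irrefl _),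
            show (2*m - 1)^2 + 4*m + t' = (2*m - 1)^2 + 1 + (4*m - 1 + t') from by ring,
            A_closed m (4*m - 1 + t') hm (by linarith) (by linarith)]
          unfold posTable
          rw [if_neg (by linarith), if_neg (by linarith), if_pos (by linarith)]
          simp only [Prod.mk.injEq]
          exact ⟨by ring, by ring⟩
        · rw [min_eq_left (by linarith)]
          exact ih _ _ _ _ _ _
            ⟨m, Or.inr (Or.inr (Or.inr ⟨by linarith, rfl, by ring, by ring, by ring, by ring⟩))⟩
            (by linarith) (by linarith)
      -- right leg (d = 0), possibly crossing into the next ring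
      · rw [show PySem.List.pyGetD ([1,0,-1,0] : List Int) 0 0 = 1 from by decide,
          show PySem.List.pyGetD ([0,1,0,-1] : List Int) 0 0 = 0 from by decide,
          show PySem.Int.mod (0+1) 4 = 1 from by decide,
          if_neg (show ¬ PySem.Int.mod (1:Int) 2 = 0 from by decide)]
        obtain ⟨t', rfl⟩ : ∃ t', target = (2*m - 1)^2 + 6*m + t' :=
          ⟨target - ((2*m - 1)^2 + 6*m), by ring⟩
        rw [show (2*m - 1)^2 + 6*m + t' - ((2*m - 1)^2 + 6*m) = t' from by ring]
        have ht1 : 1 ≤ t' := by linarith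
        by_cases hpar : t' ≤ 2*m + 1
        · rw [min_eq_right (by linarith), walk_stop _ _ _ _ _ _ _ (lt_irrefl _)]
          by_cases hlast : t' ≤ 2*m
          · have hm1 : 1 ≤ m := by linarith
            rw [show (2*m - 1)^2 + 6*m + t' = (2*m - 1)^2 + 1 + (6*m - 1 + t') from by ring,
              A_closed m (6*m - 1 + t') hm1 (by linarith) (by linarith)]
            unfold posTable
            rw [if_neg (by linarith), if_neg (by linarith), if_neg (by linarith)]
            simp only [Prod.mk.injEq]
            exact ⟨by ring, by ring⟩
          · have ht2 : t' = 2*m + 1 := by linarith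
            subst ht2
            rw [show (2*m - 1)^2 + 6*m + (2*m + 1) = (2*(m+1) - 1)^2 + 1 + 0 from by ring,
              A_closed (m+1) 0 (by linarith) le_rfl (by linarith)]
            unfold posTable
            rw [if_pos (by linarith)]
            simp only [Prod.mk.injEq]
            exact ⟨by ring, by ring⟩
        · rw [min_eq_left (by linarith)]
          exact ih _ _ _ _ _ _
            ⟨m + 1, Or.inl ⟨by linarith, rfl, by ring, by ring, by ring, by ring⟩⟩
            (by linarith) (by linarith)
    · rw [walk_stop _ _ _ _ _ _ _ hlt]
      have hloc : loc = target := by omega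
      subst hloc
      exact head_pos _ x y leg d hInv

-- ===== VERDICT (by name: the statement is the Claim_ definition above) =====
theorem get_memory_position_spec : Claim_equal_get_memory_position := by
  intro ml _ hpre
  unfold Spec_get_memory_position get_memory_position_alt
  unfold Pre_get_memory_position at hpre
  rcases lt_or_ge ml 1 with hlt | hge
  · have h0 : ml = 0 := by omega
    subst h0; decide
  · have hfuel : ((ml - 1).toNat : Int) = ml - 1 := by omega
    have := walk_ok (ml - 1).toNat 0 0 1 1 0 ml
      ⟨0, Or.inr (Or.inr (Or.inr (by norm_num)))⟩ (by omega) (by omega)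
    exact this.symm
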